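-- pv_equiv track=rewrite | github.com/Temikmus/Course_work | Backend/support_functions/chart_functions.py | aggregate_with_count
-- ===== SOURCE A (Python) =====
-- import collections
--
-- def aggregate_with_count(arr, aggregate):
--     if not arr:
--         return None, 0
--     counts = collections.Counter(arr)
--     if aggregate == "mode":
--         max_count = max(counts.values())
--         aggregate_value = next(k for k, v in counts.items() if v == max_count)
--     elif aggregate == "max":
--         aggregate_value = max(counts.keys())
--         max_count = next(v for k, v in counts.items() if k == aggregate_value)
--     elif aggregate == "min":
--         aggregate_value = min(counts.keys())
--         max_count = next(v for k, v in counts.items() if k == aggregate_value)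
--     else:
--         return None, 0
--
--     return aggregate_value, max_count
-- ===== SOURCE B (Python) =====
-- def aggregate_with_count(arr, aggregate):
--     if not arr:
--         return None, 0
--     # sort once, then run-length encode: runs = [(value, multiplicity)] with values strictly increasing
--     s = sorted(arr)
--     runs = []
--     i = 0
--     while i < len(s):
--         j = i
--         while j < len(s) and s[j] == s[i]:
--             j += 1
--         runs.append((s[i], j - i))
--         i = j
--     if aggregate == "mode":
--         freq = dict(runs)
--         top = max(freq.values())
--         for x in arr:                 # first element of arr attaining the top count
--             if freq[x] == top:
--                 return x, top
--     if aggregate == "max":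
--         return runs[-1]               # largest value with its run length
--     if aggregate == "min":
--         return runs[0]                # smallest value with its run length
--     return None, 0
-- ===== Notes on version B (the rewrite author's own statement) =====
-- stated objective: alternative
-- what changed: B replaces A's Counter hash table with sort-then-run-length-encode: runs of the sorted copy give each value with its multiplicity, max/min are the last/first run, and mode takes the maximal run count and returns the first element of arr attaining it.
import Mathlib
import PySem

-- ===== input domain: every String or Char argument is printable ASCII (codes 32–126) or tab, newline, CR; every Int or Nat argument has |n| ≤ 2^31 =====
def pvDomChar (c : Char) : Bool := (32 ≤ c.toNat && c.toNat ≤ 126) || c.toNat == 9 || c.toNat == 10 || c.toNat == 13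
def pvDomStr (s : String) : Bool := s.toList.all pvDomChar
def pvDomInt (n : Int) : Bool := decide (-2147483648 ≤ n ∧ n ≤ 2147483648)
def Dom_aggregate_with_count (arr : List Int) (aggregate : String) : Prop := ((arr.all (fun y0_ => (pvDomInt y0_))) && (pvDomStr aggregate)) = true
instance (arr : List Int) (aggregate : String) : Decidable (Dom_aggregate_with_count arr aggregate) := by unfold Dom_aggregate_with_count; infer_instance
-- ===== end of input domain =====

-- B replaces A's Counter hash table with sort-then-run-length-encode: runs of the sorted copy
-- give each value with its multiplicity; max/min are the last/first run, and mode takes the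
-- maximal run count and returns the first element of arr attaining it (alternative, not faster).


-- ===== PORT A =====
def aggregate_with_count (arr : List Int) (aggregate : String) : Option Int × Int :=
  if arr = [] then (none, 0)
  else
    let counts := PySem.Dict.counter arr
    if aggregate = "mode" then
      -- max_count = max(counts.values()); aggregate_value = next(k for k, v in counts.items() if v == max_count)
      match PySem.List.max? counts.values (fun v => v) with
      | none => (none, 0)  -- unreachable: counts is nonempty
      | some max_count =>
        match counts.items.find? (fun kv => kv.2 == max_count) with
        | none => (none, 0)  -- unreachable
        | some kv => (some kv.1, max_count)
    else if aggregate = "max" then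
      match PySem.List.max? counts.keys (fun k => k) with
      | none => (none, 0)  -- unreachable
      | some v =>
        match counts.items.find? (fun kv => kv.1 == v) with
        | none => (none, 0)  -- unreachable
        | some kv => (some v, kv.2)
    else if aggregate = "min" then
      match PySem.List.min? counts.keys (fun k => k) with
      | none => (none, 0)  -- unreachable
      | some v =>
        match counts.items.find? (fun kv => kv.1 == v) with
        | none => (none, 0)  -- unreachable
        | some kv => (some v, kv.2)
    else (none, 0)

-- ===== PORT B =====
-- run-length encoding of the (sorted) list: the two nested while loops of Source B;
-- the inner 'while s[j] == s[i]: j += 1' is the takeWhile/dropWhile split at the head value.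
def pvRuns : List Int → List (Int × Int)
  | [] => []
  | x :: t =>
    (x, 1 + ((t.takeWhile (fun y => y == x)).length : Int)) :: pvRuns (t.dropWhile (fun y => y == x))
termination_by l => l.length
decreasing_by
  simp only [List.length_cons]
  have := List.length_dropWhile_le (fun y => y == x) t
  omega

def aggregate_with_count_alt (arr : List Int) (aggregate : String) : Option Int × Int :=
  if arr = [] then (none, 0)
  else
    let s := PySem.List.sorted arr (fun x => x) false
    let runs := pvRuns s
    if aggregate = "mode" then
      let freq := PySem.Dict.ofList runs
      match PySem.List.max? freq.values (fun v => v) with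
      | none => (none, 0)  -- unreachable: freq is nonempty
      | some top =>
        -- for x in arr: if freq[x] == top: return x, top   (freq[x] never misses: x is a key)
        match arr.find? (fun x => freq.get? x == some top) with
        | none => (none, 0)  -- unreachable: top is attained by some element of arr
        | some x => (some x, top)
    else if aggregate = "max" then
      match PySem.List.pyGet? runs (-1) with
      | none => (none, 0)  -- unreachable: runs is nonempty
      | some r => (some r.1, r.2)
    else if aggregate = "min" then
      match PySem.List.pyGet? runs 0 with
      | none => (none, 0)  -- unreachable
      | some r => (some r.1, r.2)
    else (none, 0)

-- ===== PRECONDITION & SPEC =====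
def Spec_aggregate_with_count (arr : List Int) (aggregate : String) (out : Option Int × Int) : Prop := out = aggregate_with_count_alt arr aggregate
instance (arr : List Int) (aggregate : String) (out : Option Int × Int) : Decidable (Spec_aggregate_with_count arr aggregate out) := by unfold Spec_aggregate_with_count; infer_instance

-- ===== CLAIM (what is proved, stated in full; the proofs are below) =====
def Claim_equal_aggregate_with_count : Prop := ∀ (arr : List Int) (aggregate : String), Dom_aggregate_with_count arr aggregate → Spec_aggregate_with_count arr aggregate (aggregate_with_count arr aggregate)

-- ===== LEMMAS AND PROOFS =====

-- In a sorted list x :: t, everything left after dropping the leading x-run is strictly above x.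
theorem pvDropWhile_gt (x : Int) : ∀ (t : List Int), (x :: t).Pairwise (· ≤ ·) →
    ∀ y ∈ t.dropWhile (fun y => y == x), x < y := by
  intro t
  induction t with
  | nil => intro _ y hy; simp at hy
  | cons z t' ih =>
      intro h y hy
      rcases List.pairwise_cons.mp h with ⟨hx, hz⟩
      by_cases hzx : z = x
      · subst hzx
        rw [List.dropWhile_cons_of_pos (by simp)] at hy
        have hx' : (z :: t').Pairwise (· ≤ ·) := by
          refine List.pairwise_cons.mpr ⟨?_, (List.pairwise_cons.mp hz).2⟩
          intro a ha; exact (List.pairwise_cons.mp hz).1 a ha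
        exact ih hx' y hy
      · rw [List.dropWhile_cons_of_neg (by simp [hzx])] at hy
        have hxz : x < z := lt_of_le_of_ne (hx z (by simp)) (fun e => hzx e.symm)
        rcases List.mem_cons.mp hy with rfl | hy'
        · exact hxz
        · exact lt_of_lt_of_le hxz ((List.pairwise_cons.mp hz).1 y hy')

-- Characterisation of the run-length encoding of a sorted list.
theorem pvRuns_spec : ∀ (s : List Int), s.Pairwise (· ≤ ·) →
    (∀ p ∈ pvRuns s, p.1 ∈ s ∧ p.2 = (s.count p.1 : Int)) ∧
    (∀ v ∈ s, v ∈ (pvRuns s).map Prod.fst) ∧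
    ((pvRuns s).map Prod.fst).Pairwise (· < ·) := by
  intro s
  induction s using pvRuns.induct with
  | case1 => intro _; refine ⟨?_, ?_, ?_⟩ <;> simp [pvRuns]
  | case2 x t ih =>
      intro hs
      have hdr : ∀ y ∈ t.dropWhile (fun y => y == x), x < y := pvDropWhile_gt x t hs
      have hxdr : x ∉ t.dropWhile (fun y => y == x) := fun h => lt_irrefl x (hdr x h)
      have htk : ∀ y ∈ t.takeWhile (fun y => y == x), y = x := by
        intro y hy; simpa using List.mem_takeWhile_imp hy
      have hsortdr : (t.dropWhile (fun y => y == x)).Pairwise (· ≤ ·) :=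
        List.Pairwise.sublist ((List.dropWhile_sublist _).trans (List.sublist_cons_self x t)) hs
      obtain ⟨ihP, ihM, ihS⟩ := ih hsortdr
      have hsplit : t.takeWhile (fun y => y == x) ++ t.dropWhile (fun y => y == x) = t :=
        List.takeWhile_append_dropWhile
      -- count of x in x :: t
      have htc : t.count x = (t.takeWhile (fun y => y == x)).length := by
        conv_lhs => rw [← hsplit]
        rw [List.count_append]
        have h1 : (t.takeWhile (fun y => y == x)).count x = (t.takeWhile (fun y => y == x)).length :=
          List.count_eq_length.mpr (fun b hb => (htk b hb).symm)
        have h2 : (t.dropWhile (fun y => y == x)).count x = 0 := List.count_eq_zero.mpr hxdr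
        omega
      have hcx : (x :: t).count x = 1 + (t.takeWhile (fun y => y == x)).length := by
        rw [List.count_cons_self]; omega
      have hcne : ∀ v, x < v → (x :: t).count v = (t.dropWhile (fun y => y == x)).count v := by
        intro v hv
        have hvx : v ≠ x := ne_of_gt hv
        have hstep : (x :: t).count v = t.count v := by
          simp [hvx.symm]
        rw [hstep]
        conv_lhs => rw [← hsplit]
        rw [List.count_append]
        have h1 : (t.takeWhile (fun y => y == x)).count v = 0 :=
          List.count_eq_zero.mpr (fun h => hvx (htk v h))
        omega
      rw [pvRuns]
      refine ⟨?_, ?_, ?_⟩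
      · intro p hp
        rcases List.mem_cons.mp hp with rfl | hp'
        · refine ⟨by simp, ?_⟩
          simp only []
          rw [hcx]; push_cast; ring
        · obtain ⟨hmem, hcnt⟩ := ihP p hp'
          have hgt : x < p.1 := hdr p.1 hmem
          refine ⟨?_, ?_⟩
          · have : p.1 ∈ t := (List.dropWhile_sublist _).subset hmem
            exact List.mem_cons_of_mem x this
          · rw [hcnt, hcne p.1 hgt]
      · intro v hv
        rcases List.mem_cons.mp hv with rfl | hv'
        · simp
        · rw [← hsplit] at hv'
          rcases List.mem_append.mp hv' with h | h
          · simp [htk v h]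
          · have := ihM v h
            simp only [List.map_cons]
            exact List.mem_cons_of_mem _ this
      · simp only [List.map_cons]
        refine List.pairwise_cons.mpr ⟨?_, ihS⟩
        intro a ha
        rcases List.mem_map.mp ha with ⟨p, hp, rfl⟩
        exact hdr p.1 (ihP p hp).1

theorem pvRuns_ne_nil (s : List Int) (h : s ≠ []) : pvRuns s ≠ [] := by
  cases s with
  | nil => exact absurd rfl h
  | cons x t => rw [pvRuns]; simp

-- folding Set.add only appends
theorem pvFoldlAdd_append : ∀ (t : List Int) (s : PySem.Set Int),
    ∃ u, t.foldl PySem.Set.add s = s ++ u := by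
  intro t
  induction t with
  | nil => intro s; exact ⟨[], by simp⟩
  | cons x t' ih =>
      intro s
      rw [List.foldl_cons, PySem.Set.add_eq_ite]
      by_cases hx : x ∈ s
      · rw [if_pos hx]; exact ih s
      · rw [if_neg hx]
        obtain ⟨u, hu⟩ := ih (s ++ [x])
        exact ⟨[x] ++ u, by rw [hu, List.append_assoc]⟩

theorem pvFind?_foldlAdd (p : Int → Bool) : ∀ (l : List Int) (s : PySem.Set Int),
    (∀ y ∈ s, p y = false) → (l.foldl PySem.Set.add s).find? p = l.find? p := by
  intro l
  induction l with
  | nil =>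
      intro s hs
      simp only [List.foldl_nil, List.find?_nil]
      exact List.find?_eq_none.mpr (fun x hx => by simp [hs x hx])
  | cons x t ih =>
      intro s hs
      rw [List.foldl_cons]
      by_cases hpx : p x = true
      · have hxs : x ∉ s := fun h => by simp [hs x h] at hpx
        rw [PySem.Set.add_eq_ite, if_neg hxs]
        obtain ⟨u, hu⟩ := pvFoldlAdd_append t (s ++ [x])
        rw [hu, List.append_assoc, List.find?_append]
        have h1 : s.find? p = none := List.find?_eq_none.mpr (fun y hy => by simp [hs y hy])
        rw [h1]
        simp [hpx]
      · have hadd : ∀ y ∈ PySem.Set.add s x, p y = false := by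
          intro y hy
          rcases (PySem.Set.mem_add s x y).mp hy with h | rfl
          · exact hs y h
          · exact eq_false_of_ne_true hpx
        rw [ih _ hadd, List.find?_cons_of_neg hpx]

-- first match over the ordered set of first occurrences = first match over the list itself
theorem pvFind?_ofList (p : Int → Bool) (l : List Int) :
    (PySem.Set.ofList l).find? p = l.find? p := by
  rw [PySem.Set.ofList_eq_foldl]
  exact pvFind?_foldlAdd p l [] (by simp)

theorem pvFind?_congr {α : Type} (l : List α) (p q : α → Bool) (h : ∀ x ∈ l, p x = q x) :
    l.find? p = l.find? q := by
  induction l with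
  | nil => rfl
  | cons x t ih =>
      have hx := h x (by simp)
      by_cases hp : p x = true
      · rw [List.find?_cons_of_pos hp, List.find?_cons_of_pos (hx ▸ hp)]
      · have hp' : ¬ q x = true := fun hq => hp (hx ▸ hq)
        rw [List.find?_cons_of_neg hp, List.find?_cons_of_neg hp']
        exact ih (fun y hy => h y (by simp [hy]))

-- in a strictly increasing list the last element bounds every element
theorem pvLast_isMax : ∀ (l : List Int), l.Pairwise (· < ·) → ∀ m, l.getLast? = some m →
    ∀ a ∈ l, a ≤ m := by
  intro l
  induction l with
  | nil => intro _ m hm; simp at hm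
  | cons x t ih =>
      intro hl m hm a ha
      cases t with
      | nil =>
          simp at hm ha
          omega
      | cons z t' =>
          rw [List.getLast?_cons_cons] at hm
          rcases List.pairwise_cons.mp hl with ⟨hx, ht⟩
          have hmem : m ∈ z :: t' := by
            have : (z :: t').getLast? = some m := hm
            exact List.mem_of_getLast? this
          rcases List.mem_cons.mp ha with rfl | ha'
          · exact le_of_lt (hx m hmem)
          · exact ih ht m hm a ha'

theorem pvPyGet_neg_one {α : Type} (l : List α) (h : l ≠ []) :
    PySem.List.pyGet? l (-1) = l.getLast? := by
  have hlen : 1 ≤ l.length := List.length_pos_iff.mpr h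
  rw [List.getLast?_eq_getElem?]
  simp only [PySem.List.pyGet?, PySem.List.pyIdx?]
  rw [if_neg (by omega), if_pos (by omega)]
  norm_num

theorem pvPyGet_zero {α : Type} (x : α) (t : List α) :
    PySem.List.pyGet? (x :: t) 0 = some x := by
  simp [PySem.List.pyGet?, PySem.List.pyIdx?]

-- ===== VERDICT (by name: the statement is the Claim_ definition above) =====
theorem aggregate_with_count_spec : Claim_equal_aggregate_with_count := by
  intro arr aggregate _
  unfold Spec_aggregate_with_count aggregate_with_count aggregate_with_count_alt
  by_cases harr : arr = []
  · simp [harr]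
  · simp only [if_neg harr]
    -- shared setup
    have hperm : (PySem.List.sorted arr (fun x => x) false).Perm arr :=
      PySem.List.sorted_perm arr (fun x => x) false
    have hsort : (PySem.List.sorted arr (fun x => x) false).Pairwise (· ≤ ·) :=
      PySem.List.sorted_pairwise arr (fun x => x)
    set s := PySem.List.sorted arr (fun x => x) false with hs
    have hsne : s ≠ [] := by
      rw [hs]; rw [ne_eq, PySem.List.sorted_eq_nil_iff]; exact harr
    have hcnt : ∀ v, s.count v = arr.count v := fun v => hperm.count_eq v
    have hmem : ∀ v, v ∈ s ↔ v ∈ arr := fun v => hperm.mem_iff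
    obtain ⟨hR1, hR2, hR3⟩ := pvRuns_spec s hsort
    have hrne : pvRuns s ≠ [] := pvRuns_ne_nil s hsne
    have hofl : PySem.Set.ofList arr ≠ [] := by
      cases arr with
      | nil => exact absurd rfl harr
      | cons a t =>
          have : a ∈ PySem.Set.ofList (a :: t) :=
            (PySem.Set.mem_ofList (a :: t) a).mpr List.mem_cons_self
          exact List.ne_nil_of_mem this
    have hitems : (PySem.Dict.counter arr).items =
        (PySem.Set.ofList arr).map (fun k => (k, (arr.count k : Int))) :=
      PySem.Dict.items_counter arr
    have hkeys : (PySem.Dict.counter arr).keys = PySem.Set.ofList arr :=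
      PySem.Dict.keys_counter arr
    -- facts about pvRuns, restated through the permutation
    have hR1' : ∀ p ∈ pvRuns s, p.1 ∈ arr ∧ p.2 = (arr.count p.1 : Int) := by
      intro p hp
      obtain ⟨h1, h2⟩ := hR1 p hp
      exact ⟨(hmem p.1).mp h1, by rw [h2, hcnt]⟩
    have hR2' : ∀ v ∈ arr, v ∈ (pvRuns s).map Prod.fst := fun v hv => hR2 v ((hmem v).mpr hv)
    by_cases hmode : aggregate = "mode"
    · simp only [if_pos hmode]
      -- the dict freq = dict(runs): its items are exactly the runs
      have hfresh : (PySem.Dict.ofList (pvRuns s)).items = pvRuns s := by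
        unfold PySem.Dict.ofList PySem.Dict.update
        have hnd : ((pvRuns s).map Prod.fst).Nodup := by
          refine List.Pairwise.imp ?_ hR3
          exact fun h => ne_of_lt h
        rw [PySem.Dict.items_foldl_insert_fresh (pvRuns s) Prod.fst Prod.snd PySem.Dict.empty
          (fun a _ => PySem.Dict.contains_empty a.1) hnd]
        simp [PySem.Dict.empty]
      have hfknd : (PySem.Dict.ofList (pvRuns s)).keys.Nodup := by
        simp only [PySem.Dict.keys, hfresh]
        refine List.Pairwise.imp ?_ hR3
        exact fun h => ne_of_lt h
      have hfvals : (PySem.Dict.ofList (pvRuns s)).values = (pvRuns s).map Prod.snd := by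
        simp only [PySem.Dict.values, hfresh]
      have hget : ∀ x ∈ arr, (PySem.Dict.ofList (pvRuns s)).get? x = some (arr.count x : Int) := by
        intro x hx
        rcases List.mem_map.mp (hR2' x hx) with ⟨p, hp, rfl⟩
        have h2 := (hR1' p hp).2
        have hp' : (p.1, p.2) ∈ (PySem.Dict.ofList (pvRuns s)).items := by
          rw [hfresh]; exact hp
        have hg := PySem.Dict.get?_of_mem_items _ hp' hfknd
        rw [hg, h2]
      -- A's maximal count
      have hvalsA : (PySem.Dict.counter arr).values =
          (PySem.Set.ofList arr).map (fun k => (arr.count k : Int)) := by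
        simp only [PySem.Dict.values, hitems, List.map_map]
        rfl
      have hvalsAne : (PySem.Dict.counter arr).values ≠ [] := by
        rw [hvalsA]; simpa using hofl
      obtain ⟨m, hA⟩ : ∃ m, PySem.List.max? (PySem.Dict.counter arr).values (fun v => v) = some m := by
        cases hx : PySem.List.max? (PySem.Dict.counter arr).values (fun v => v) with
        | none => exact absurd ((PySem.List.max?_eq_none_iff _ _).mp hx) hvalsAne
        | some m => exact ⟨m, rfl⟩
      -- B's maximal count
      have hvalsBne : (PySem.Dict.ofList (pvRuns s)).values ≠ [] := by
        rw [hfvals]; simpa using hrne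
      obtain ⟨T, hB⟩ : ∃ T, PySem.List.max? (PySem.Dict.ofList (pvRuns s)).values (fun v => v) = some T := by
        cases hx : PySem.List.max? (PySem.Dict.ofList (pvRuns s)).values (fun v => v) with
        | none => exact absurd ((PySem.List.max?_eq_none_iff _ _).mp hx) hvalsBne
        | some T => exact ⟨T, rfl⟩
      -- m = T
      have hmmax : ∀ w ∈ arr, (arr.count w : Int) ≤ m := by
        intro w hw
        refine PySem.List.max?_isMax hA _ ?_
        rw [hvalsA]
        exact List.mem_map.mpr ⟨w, (PySem.Set.mem_ofList arr w).mpr hw, rfl⟩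
      have hTmax : ∀ w ∈ arr, (arr.count w : Int) ≤ T := by
        intro w hw
        rcases List.mem_map.mp (hR2' w hw) with ⟨p, hp, rfl⟩
        have h2 := (hR1' p hp).2
        refine le_of_eq_of_le h2.symm (PySem.List.max?_isMax hB _ ?_)
        rw [hfvals]
        exact List.mem_map.mpr ⟨p, hp, rfl⟩
      obtain ⟨wm, hwm, hwmc⟩ : ∃ w ∈ arr, (arr.count w : Int) = m := by
        have := PySem.List.max?_mem hA
        rw [hvalsA] at this
        rcases List.mem_map.mp this with ⟨k, hk, hkm⟩
        exact ⟨k, (PySem.Set.mem_ofList arr k).mp hk, hkm⟩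
      obtain ⟨wT, hwT, hwTc⟩ : ∃ w ∈ arr, (arr.count w : Int) = T := by
        have := PySem.List.max?_mem hB
        rw [hfvals] at this
        rcases List.mem_map.mp this with ⟨p, hp, hpT⟩
        exact ⟨p.1, (hR1' p hp).1, by rw [(hR1' p hp).2] at hpT; exact hpT⟩
      have hmT : m = T := le_antisymm (hwmc ▸ hTmax wm hwm) (hwTc ▸ hmmax wT hwT)
      -- A's find? reduces to a find? over arr
      have hAfind : (PySem.Dict.counter arr).items.find? (fun kv => kv.2 == m) =
          (arr.find? (fun k => (arr.count k : Int) == m)).map (fun k => (k, (arr.count k : Int))) := by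
        rw [hitems, List.find?_map]
        congr 1
        exact pvFind?_ofList (fun k => (arr.count k : Int) == m) arr
      -- B's find? is the same find? over arr
      have hBfind : arr.find? (fun x => (PySem.Dict.ofList (pvRuns s)).get? x == some T) =
          arr.find? (fun k => (arr.count k : Int) == m) := by
        refine pvFind?_congr arr _ _ ?_
        intro x hx
        rw [hget x hx, hmT]
        simp
      -- the common find? succeeds
      obtain ⟨k0, hk0⟩ : ∃ k0, arr.find? (fun k => (arr.count k : Int) == m) = some k0 := by
        have : (arr.find? (fun k => (arr.count k : Int) == m)).isSome :=
          List.find?_isSome.mpr ⟨wm, hwm, by simp [hwmc]⟩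
        cases hx : arr.find? (fun k => (arr.count k : Int) == m) with
        | none => rw [hx] at this; simp at this
        | some k0 => exact ⟨k0, rfl⟩
      simp only [hs] at hB hBfind ⊢
      subst hmT
      simp [hA, hB, hAfind, hBfind, hk0]
    · simp only [if_neg hmode]
      by_cases hmax : aggregate = "max"
      · simp only [if_pos hmax]
        -- B: last run
        obtain ⟨r, hr⟩ : ∃ r, (pvRuns s).getLast? = some r := by
          cases hx : (pvRuns s).getLast? with
          | none => exact absurd (List.getLast?_eq_none_iff.mp hx) hrne
          | some r => exact ⟨r, rfl⟩
        have hget : PySem.List.pyGet? (pvRuns s) (-1) = some r := by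
          rw [pvPyGet_neg_one _ hrne, hr]
        have hrmem : r ∈ pvRuns s := List.mem_of_getLast? hr
        have hrfst : ((pvRuns s).map Prod.fst).getLast? = some r.1 := by
          rw [List.getLast?_map, hr]; rfl
        have hrmax : ∀ a ∈ (pvRuns s).map Prod.fst, a ≤ r.1 :=
          pvLast_isMax _ hR3 r.1 hrfst
        -- A: max over keys
        have hkne : (PySem.Dict.counter arr).keys ≠ [] := by rw [hkeys]; exact hofl
        obtain ⟨v, hA⟩ : ∃ v, PySem.List.max? (PySem.Dict.counter arr).keys (fun k => k) = some v := by
          cases hx : PySem.List.max? (PySem.Dict.counter arr).keys (fun k => k) with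
          | none => exact absurd ((PySem.List.max?_eq_none_iff _ _).mp hx) hkne
          | some v => exact ⟨v, rfl⟩
        have hvarr : v ∈ arr := by
          have := PySem.List.max?_mem hA
          rw [hkeys] at this
          exact (PySem.Set.mem_ofList arr v).mp this
        have hvr : v = r.1 := by
          have h1 : v ≤ r.1 := hrmax v (hR2' v hvarr)
          have h2 : r.1 ≤ v := PySem.List.max?_isMax hA r.1
            (by rw [hkeys]; exact (PySem.Set.mem_ofList arr r.1).mpr (hR1' r hrmem).1)
          exact le_antisymm h1 h2
        have hAfind : (PySem.Dict.counter arr).items.find? (fun kv => kv.1 == v) =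
            some (v, (arr.count v : Int)) := by
          rw [hitems, List.find?_map]
          have : (PySem.Set.ofList arr).find? ((fun kv => kv.1 == v) ∘ (fun k => (k, (arr.count k : Int)))) =
              (PySem.Set.ofList arr).find? (fun k => k == v) := rfl
          rw [this, pvFind?_ofList]
          have hfv : arr.find? (fun k => k == v) = some v := by
            have h1 : (arr.find? (fun k => k == v)).isSome :=
              List.find?_isSome.mpr ⟨v, hvarr, by simp⟩
            cases hx : arr.find? (fun k => k == v) with
            | none => rw [hx] at h1; simp at h1
            | some w =>
                have := List.find?_some hx
                simp at this
                rw [this]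
          rw [hfv]; rfl
        simp only [hs] at hget ⊢
        have h2 := (hR1' r hrmem).2
        subst hvr
        rw [hkeys] at hA
        simp [hA, hget, hAfind, h2]
      · simp only [if_neg hmax]
        by_cases hmin : aggregate = "min"
        · simp only [if_pos hmin]
          -- B: first run
          obtain ⟨r, rs, hrr⟩ : ∃ r rs, pvRuns s = r :: rs := by
            cases hx : pvRuns s with
            | nil => exact absurd hx hrne
            | cons r rs => exact ⟨r, rs, rfl⟩
          have hget : PySem.List.pyGet? (pvRuns s) 0 = some r := by
            rw [hrr]; exact pvPyGet_zero r rs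
          have hrmem : r ∈ pvRuns s := by rw [hrr]; simp
          have hrmin : ∀ a ∈ (pvRuns s).map Prod.fst, r.1 ≤ a := by
            intro a ha
            rw [hrr] at ha
            simp only [List.map_cons] at ha
            rcases List.mem_cons.mp ha with rfl | ha'
            · exact le_refl _
            · have := hR3
              rw [hrr] at this
              simp only [List.map_cons] at this
              exact le_of_lt ((List.pairwise_cons.mp this).1 a ha')
          -- A: min over keys
          have hkne : (PySem.Dict.counter arr).keys ≠ [] := by rw [hkeys]; exact hofl
          obtain ⟨v, hA⟩ : ∃ v, PySem.List.min? (PySem.Dict.counter arr).keys (fun k => k) = some v := by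
            cases hx : PySem.List.min? (PySem.Dict.counter arr).keys (fun k => k) with
            | none => exact absurd ((PySem.List.min?_eq_none_iff _ _).mp hx) hkne
            | some v => exact ⟨v, rfl⟩
          have hvarr : v ∈ arr := by
            have := PySem.List.min?_mem hA
            rw [hkeys] at this
            exact (PySem.Set.mem_ofList arr v).mp this
          have hvr : v = r.1 := by
            have h1 : r.1 ≤ v := hrmin v (hR2' v hvarr)
            have h2 : v ≤ r.1 := PySem.List.min?_isMin hA r.1
              (by rw [hkeys]; exact (PySem.Set.mem_ofList arr r.1).mpr (hR1' r hrmem).1)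
            exact le_antisymm h2 h1
          have hAfind : (PySem.Dict.counter arr).items.find? (fun kv => kv.1 == v) =
              some (v, (arr.count v : Int)) := by
            rw [hitems, List.find?_map]
            have : (PySem.Set.ofList arr).find? ((fun kv => kv.1 == v) ∘ (fun k => (k, (arr.count k : Int)))) =
                (PySem.Set.ofList arr).find? (fun k => k == v) := rfl
            rw [this, pvFind?_ofList]
            have hfv : arr.find? (fun k => k == v) = some v := by
              have h1 : (arr.find? (fun k => k == v)).isSome :=
                List.find?_isSome.mpr ⟨v, hvarr, by simp⟩
              cases hx : arr.find? (fun k => k == v) with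
              | none => rw [hx] at h1; simp at h1
              | some w =>
                  have := List.find?_some hx
                  simp at this
                  rw [this]
            rw [hfv]; rfl
          simp only [hs] at hget ⊢
          have h2 := (hR1' r hrmem).2
          subst hvr
          rw [hkeys] at hA
          simp [hA, hget, hAfind, h2]
        · simp [hmin]
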